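-- pv_equiv track=rewrite | github.com/joseburneo/connect-resources | app/provider_analyzer.py | categorize_email_provider
-- ===== SOURCE A (Python) =====
-- def categorize_email_provider(email):
--     """Categorize email by provider"""
--     domain = email.split('@')[-1].lower()
--
--     # Gmail/Google Workspace
--     if 'gmail.com' in domain or 'googlemail.com' in domain:
--         return 'Google'
--
--     # Microsoft (Outlook, Hotmail, Live, Office365)
--     if any(x in domain for x in ['outlook.', 'hotmail.', 'live.', 'msn.', 'office365.']):
--         return 'Microsoft'
--
--     # Yahoo
--     if 'yahoo.' in domain or 'ymail.' in domain:
--         return 'Yahoo'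
--
--     # Others
--     return 'Others'
-- ===== SOURCE B (Python) =====
-- PATTERN_CATEGORY = [
--     ("gmail.com", "Google"), ("googlemail.com", "Google"),
--     ("outlook.", "Microsoft"), ("hotmail.", "Microsoft"), ("live.", "Microsoft"),
--     ("msn.", "Microsoft"), ("office365.", "Microsoft"),
--     ("yahoo.", "Yahoo"), ("ymail.", "Yahoo"),
-- ]
--
-- PRIORITY = ("Google", "Microsoft", "Yahoo")
--
-- def categorize_email_provider(email):
--     """Categorize email by provider: enumerate every suffix of the domain,
--     collect the categories whose pattern starts some suffix, then resolve
--     the collected set by priority order."""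
--     domain = email.split('@')[-1].lower()
--     matched = set()
--     for i in range(len(domain) + 1):
--         for pattern, category in PATTERN_CATEGORY:
--             if domain.startswith(pattern, i):
--                 matched.add(category)
--     for category in PRIORITY:
--         if category in matched:
--             return category
--     return 'Others'
-- ===== Notes on version B (the rewrite author's own statement) =====
-- stated objective: alternative
-- what changed: Instead of A's per-category substring-search cascade with early return, B enumerates every suffix of the lowercased domain once, collects into a set each category whose pattern is a prefix of some suffix, and then resolves the collected set against a priority list.
import Mathlib
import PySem

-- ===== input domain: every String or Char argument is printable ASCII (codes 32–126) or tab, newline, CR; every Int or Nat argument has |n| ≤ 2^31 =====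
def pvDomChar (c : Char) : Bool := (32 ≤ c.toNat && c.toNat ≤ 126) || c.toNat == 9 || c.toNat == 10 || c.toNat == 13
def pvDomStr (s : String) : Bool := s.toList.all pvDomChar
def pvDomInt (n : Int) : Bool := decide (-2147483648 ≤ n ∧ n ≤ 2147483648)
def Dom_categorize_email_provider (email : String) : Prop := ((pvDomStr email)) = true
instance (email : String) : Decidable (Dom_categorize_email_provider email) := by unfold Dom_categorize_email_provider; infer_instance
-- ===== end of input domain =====

-- B replaces A's per-category substring cascade by one suffix scan of the domain that collects
-- matched categories into a set, resolved afterwards by a priority list (alternative algorithm; not claimed faster).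

-- ===== PORT A =====
def categorize_email_provider (email : String) : String :=
  -- email.split('@')[-1] is total: split always yields at least one piece
  let domain := PySem.Str.lower ((PySem.List.pyGet? ((PySem.Str.split? email "@").getD []) (-1)).getD "")
  if PySem.Str.isIn "gmail.com" domain || PySem.Str.isIn "googlemail.com" domain then "Google"
  else if ["outlook.", "hotmail.", "live.", "msn.", "office365."].any
            (fun x => PySem.Str.isIn x domain) then "Microsoft"
  else if PySem.Str.isIn "yahoo." domain || PySem.Str.isIn "ymail." domain then "Yahoo"
  else "Others"

-- ===== PORT B =====
def pvPatternCategory : List (String × String) :=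
  [("gmail.com", "Google"), ("googlemail.com", "Google"),
   ("outlook.", "Microsoft"), ("hotmail.", "Microsoft"), ("live.", "Microsoft"),
   ("msn.", "Microsoft"), ("office365.", "Microsoft"),
   ("yahoo.", "Yahoo"), ("ymail.", "Yahoo")]

def pvPriority : List String := ["Google", "Microsoft", "Yahoo"]

-- the priority-resolution loop: first category of the priority list present in the set
def pvFirstOf (matched : PySem.Set String) : List String → String
  | [] => "Others"
  | c :: rest => if PySem.Set.contains matched c then c else pvFirstOf matched rest

-- the suffix scan: for i in range(len(domain)+1): for (pattern, category) in PATTERN_CATEGORY: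
--   if domain.startswith(pattern, i): matched.add(category)
-- domain.startswith(pattern, i) is ported as startswith(domain[i:], pattern): exact for the
-- non-negative in-range i that range() produces (hand port; PySem has no startswith-with-start)
def pvMatched (domain : String) : PySem.Set String :=
  (PySem.List.pyRange 0 (PySem.Str.len domain + 1) 1).foldl (fun acc i =>
    pvPatternCategory.foldl (fun a pc =>
      if PySem.Str.startswith (PySem.Str.slice domain (some i) none) pc.1 then PySem.Set.add a pc.2
      else a) acc) PySem.Set.empty

def categorize_email_provider_alt (email : String) : String :=
  let domain := PySem.Str.lower ((PySem.List.pyGet? ((PySem.Str.split? email "@").getD []) (-1)).getD "")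
  pvFirstOf (pvMatched domain) pvPriority

-- ===== PRECONDITION & SPEC =====
def Spec_categorize_email_provider (email : String) (out : String) : Prop := out = categorize_email_provider_alt email
instance (email : String) (out : String) : Decidable (Spec_categorize_email_provider email out) := by unfold Spec_categorize_email_provider; infer_instance

-- ===== CLAIM =====
def Claim_equal_categorize_email_provider : Prop := ∀ (email : String), Dom_categorize_email_provider email → Spec_categorize_email_provider email (categorize_email_provider email)

-- ===== LEMMAS AND PROOFS =====

-- membership in the inner per-table fold
lemma mem_inner_fold (d : String) (i : Int) (tbl : List (String × String)) (s : PySem.Set String) (y : String) :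
    y ∈ tbl.foldl (fun a pc =>
        if PySem.Str.startswith (PySem.Str.slice d (some i) none) pc.1 then PySem.Set.add a pc.2
        else a) s ↔
      y ∈ s ∨ ∃ pc ∈ tbl, PySem.Str.startswith (PySem.Str.slice d (some i) none) pc.1 = true ∧ pc.2 = y := by
  induction tbl generalizing s with
  | nil => simp
  | cons pc rest ih =>
      simp only [List.foldl_cons]
      by_cases h : PySem.Str.startswith (PySem.Str.slice d (some i) none) pc.1 = true
      · rw [if_pos h, ih, PySem.Set.mem_add]
        constructor
        · rintro ((hs | rfl) | ⟨q, hq, hqs, hqy⟩)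
          · exact Or.inl hs
          · exact Or.inr ⟨pc, List.mem_cons_self, h, rfl⟩
          · exact Or.inr ⟨q, List.mem_cons_of_mem _ hq, hqs, hqy⟩
        · rintro (hs | ⟨q, hq, hqs, hqy⟩)
          · exact Or.inl (Or.inl hs)
          · rcases List.mem_cons.mp hq with rfl | hq'
            · exact Or.inl (Or.inr hqy.symm)
            · exact Or.inr ⟨q, hq', hqs, hqy⟩
      · rw [if_neg h, ih]
        constructor
        · rintro (hs | ⟨q, hq, hqs, hqy⟩)
          · exact Or.inl hs
          · exact Or.inr ⟨q, List.mem_cons_of_mem _ hq, hqs, hqy⟩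
        · rintro (hs | ⟨q, hq, hqs, hqy⟩)
          · exact Or.inl hs
          · rcases List.mem_cons.mp hq with rfl | hq'
            · exact absurd hqs h
            · exact Or.inr ⟨q, hq', hqs, hqy⟩

-- membership in the whole suffix scan
lemma mem_matched (d : String) (idxs : List Int) (s : PySem.Set String) (y : String) :
    y ∈ idxs.foldl (fun acc i =>
        pvPatternCategory.foldl (fun a pc =>
          if PySem.Str.startswith (PySem.Str.slice d (some i) none) pc.1 then PySem.Set.add a pc.2
          else a) acc) s ↔
      y ∈ s ∨ ∃ i ∈ idxs, ∃ pc ∈ pvPatternCategory,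
        PySem.Str.startswith (PySem.Str.slice d (some i) none) pc.1 = true ∧ pc.2 = y := by
  induction idxs generalizing s with
  | nil => simp
  | cons i rest ih =>
      simp only [List.foldl_cons, ih, mem_inner_fold]
      constructor
      · rintro (h | h)
        · rcases h with h | h
          · exact Or.inl h
          · exact Or.inr ⟨i, by simp, h⟩
        · rcases h with ⟨j, hj, hh⟩
          exact Or.inr ⟨j, by simp [hj], hh⟩
      · rintro (h | ⟨j, hj, hh⟩)
        · exact Or.inl (Or.inl h)
        · rcases List.mem_cons.mp hj with rfl | hj'
          · exact Or.inl (Or.inr hh)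
          · exact Or.inr ⟨j, hj', hh⟩

-- a pattern starts some suffix of d scanned by range(len(d)+1) iff it is a substring of d
lemma exists_suffix_startswith_iff (d p : String) :
    (∃ i ∈ PySem.List.pyRange 0 (PySem.Str.len d + 1) 1,
        PySem.Str.startswith (PySem.Str.slice d (some i) none) p = true) ↔
      PySem.Str.isIn p d = true := by
  rw [PySem.Str.isIn_eq, ← PySem.Chars.exists_prefix_drop_iff_isIn (s := d.toList) (sub := p.toList)]
  have hlen : PySem.Str.len d = (d.toList.length : Int) := by
    simp [PySem.Str.len_eq]
  constructor
  · rintro ⟨i, hi, hsw⟩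
    rw [PySem.List.mem_pyRange_one] at hi
    refine ⟨i.toNat, ?_⟩
    have : (PySem.Str.slice d (some i) none).toList = d.toList.drop i.toNat := by
      simp [PySem.Str.slice, PySem.Chars.slice_eq_listSlice, PySem.List.slice_from _ hi.1]
    rw [PySem.Str.startswith_eq, this, PySem.Chars.startswith_iff] at hsw
    exact hsw
  · rintro ⟨j, hj⟩
    refine ⟨(min j d.toList.length : Nat), ?_, ?_⟩
    · rw [PySem.List.mem_pyRange_one, hlen]
      constructor
      · exact_mod_cast Nat.zero_le _
      · exact_mod_cast Nat.lt_succ_of_le (Nat.min_le_right _ _)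
    · have hsw : p.toList <+: d.toList.drop (min j d.toList.length) := by
        by_cases hle : j ≤ d.toList.length
        · rwa [Nat.min_eq_left hle]
        · have h1 : d.toList.drop (min j d.toList.length) = [] :=
            List.drop_eq_nil_of_le (by omega)
          have h2 : d.toList.drop j = [] := List.drop_eq_nil_of_le (by omega)
          rw [h1]; rw [h2] at hj; exact hj
      rw [PySem.Str.startswith_eq]
      have : (PySem.Str.slice d (some ((min j d.toList.length : Nat) : Int)) none).toList
          = d.toList.drop (min j d.toList.length) := by
        simp only [PySem.Str.slice, PySem.Chars.slice_eq_listSlice,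
          PySem.List.slice_from_natCast]
        simp
      rw [this, PySem.Chars.startswith_iff]
      exact hsw

-- the matched set contains category c iff one of c's patterns is a substring of the domain
lemma contains_pvMatched (d : String) (c : String) :
    PySem.Set.contains (pvMatched d) c = true ↔
      ∃ pc ∈ pvPatternCategory, PySem.Str.isIn pc.1 d = true ∧ pc.2 = c := by
  rw [PySem.Set.contains_iff, pvMatched, mem_matched]
  simp only [PySem.Set.empty, List.not_mem_nil, false_or]
  constructor
  · rintro ⟨i, hi, pc, hpc, hsw, rfl⟩
    exact ⟨pc, hpc, (exists_suffix_startswith_iff d pc.1).mp ⟨i, hi, hsw⟩, rfl⟩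
  · rintro ⟨pc, hpc, hin, rfl⟩
    rcases (exists_suffix_startswith_iff d pc.1).mpr hin with ⟨i, hi, hsw⟩
    exact ⟨i, hi, pc, hpc, hsw, rfl⟩

lemma contains_google (d : String) :
    PySem.Set.contains (pvMatched d) "Google" =
      (PySem.Str.isIn "gmail.com" d || PySem.Str.isIn "googlemail.com" d) := by
  rw [Bool.eq_iff_iff, contains_pvMatched]
  simp [pvPatternCategory]

lemma contains_microsoft (d : String) :
    PySem.Set.contains (pvMatched d) "Microsoft" =
      (["outlook.", "hotmail.", "live.", "msn.", "office365."].any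
        (fun x => PySem.Str.isIn x d)) := by
  rw [Bool.eq_iff_iff, contains_pvMatched]
  simp [pvPatternCategory]

lemma contains_yahoo (d : String) :
    PySem.Set.contains (pvMatched d) "Yahoo" =
      (PySem.Str.isIn "yahoo." d || PySem.Str.isIn "ymail." d) := by
  rw [Bool.eq_iff_iff, contains_pvMatched]
  simp [pvPatternCategory]

-- ===== VERDICT =====
theorem categorize_email_provider_spec : Claim_equal_categorize_email_provider := by
  intro email _
  unfold Spec_categorize_email_provider categorize_email_provider categorize_email_provider_alt
  simp only [pvFirstOf, pvPriority, contains_google, contains_microsoft, contains_yahoo]
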